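-- pv_equiv track=rewrite | github.com/weishi10141993/waffles | src/waffles/utils/check_utils.py | baseline_limits_are_well_formed
-- ===== SOURCE A (Python) =====
-- from typing import List
--
-- def baseline_limits_are_well_formed(baseline_limits : List[int],
--                                     points_no : int) -> bool:
--
--     """
--     This method returns True if len(baseline_limits) is an even
--     positive number and
--     0 <= baseline_limits[0] < baseline_limits[1] < ... < baseline_limits[-1] <= points_no - 1.
--     It returns False if else.
--
--     Parameters
--     ----------
--     baseline_limits : list of int
--     points_no : int
--         Stands for number of points
--
--     Returns
--     ----------
--     bool
--     """
--
--     if len(baseline_limits) == 0 or len(baseline_limits)%2 != 0: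
--         return False
--
--     if baseline_limits[0] < 0:
--         return False
--
--     for i in range(0, len(baseline_limits) - 1):
--         if baseline_limits[i] >= baseline_limits[i + 1]:
--             return False
--
--     if baseline_limits[-1] > points_no - 1:
--         return False
--
--     return True
-- ===== SOURCE B (Python) =====
-- from typing import List
--
-- def baseline_limits_are_well_formed(baseline_limits : List[int],
--                                     points_no : int) -> bool:
--     # sorted/distinct view instead of an adjacent-pair index scan
--     if len(baseline_limits) == 0 or len(baseline_limits) % 2 != 0:
--         return False
--     return (baseline_limits == sorted(baseline_limits)
--             and len(set(baseline_limits)) == len(baseline_limits)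
--             and min(baseline_limits) >= 0
--             and max(baseline_limits) <= points_no - 1)
-- ===== Notes on version B (the rewrite author's own statement) =====
-- stated objective: alternative
-- what changed: Replaces the adjacent-pair index loop plus first/last element checks with a sorting-based predicate: the list must equal its sorted copy, have no duplicates (set size), and have min >= 0 and max <= points_no - 1.
import Mathlib
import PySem

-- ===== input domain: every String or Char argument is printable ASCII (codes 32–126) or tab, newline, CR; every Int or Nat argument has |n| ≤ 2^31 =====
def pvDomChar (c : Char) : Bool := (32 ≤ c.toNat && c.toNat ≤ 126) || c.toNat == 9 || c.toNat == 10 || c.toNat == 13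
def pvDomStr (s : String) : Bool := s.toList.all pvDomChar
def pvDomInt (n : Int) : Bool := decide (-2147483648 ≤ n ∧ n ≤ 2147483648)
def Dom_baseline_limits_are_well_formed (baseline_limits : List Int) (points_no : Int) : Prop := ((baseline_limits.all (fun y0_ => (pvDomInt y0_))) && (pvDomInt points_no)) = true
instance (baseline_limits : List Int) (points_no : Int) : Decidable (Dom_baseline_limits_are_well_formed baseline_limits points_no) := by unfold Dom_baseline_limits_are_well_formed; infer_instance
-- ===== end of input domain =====

-- B restates A's adjacent-pair scan as a sorting-based predicate (sorted copy + duplicate-free + min/max bounds); alternative formulation, not claimed faster.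

-- ===== PORT A =====
-- the 'for i in range(0, len-1): if bl[i] >= bl[i+1]: return False' loop,
-- as the obvious structural recursion over the same adjacent pairs
def blAdjLoop : List Int → Bool
  | x :: y :: rest => if x ≥ y then false else blAdjLoop (y :: rest)
  | _ => true

def baseline_limits_are_well_formed (baseline_limits : List Int) (points_no : Int) : Bool :=
  if baseline_limits.length == 0 || baseline_limits.length % 2 != 0 then false
  else
    match PySem.List.pyGet? baseline_limits 0 with
    | none => false  -- unreachable: the guard above ensures the list is non-empty
    | some h =>
      if h < 0 then false
      else if blAdjLoop baseline_limits = false then false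
      else
        match PySem.List.pyGet? baseline_limits (-1) with
        | none => false  -- unreachable
        | some last => if last > points_no - 1 then false else true

-- ===== PORT B =====
def baseline_limits_are_well_formed_alt (baseline_limits : List Int) (points_no : Int) : Bool :=
  if baseline_limits.length == 0 || baseline_limits.length % 2 != 0 then false
  else
    decide (baseline_limits = PySem.List.sorted baseline_limits (fun x => x) false)
    && ((PySem.Set.ofList baseline_limits).length == baseline_limits.length)
    && (match PySem.List.min? baseline_limits (fun x => x) with
        | some m => decide (0 ≤ m)
        | none => false)  -- unreachable after the non-empty guard
    && (match PySem.List.max? baseline_limits (fun x => x) with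
        | some m => decide (m ≤ points_no - 1)
        | none => false)  -- unreachable after the non-empty guard

-- ===== PRECONDITION & SPEC =====
def Spec_baseline_limits_are_well_formed (baseline_limits : List Int) (points_no : Int) (out : Bool) : Prop := out = baseline_limits_are_well_formed_alt baseline_limits points_no
instance (baseline_limits : List Int) (points_no : Int) (out : Bool) : Decidable (Spec_baseline_limits_are_well_formed baseline_limits points_no out) := by unfold Spec_baseline_limits_are_well_formed; infer_instance

-- ===== CLAIM (what is proved, stated in full; the proofs are below) =====
def Claim_equal_baseline_limits_are_well_formed : Prop := ∀ (baseline_limits : List Int) (points_no : Int), Dom_baseline_limits_are_well_formed baseline_limits points_no → Spec_baseline_limits_are_well_formed baseline_limits points_no (baseline_limits_are_well_formed baseline_limits points_no)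

-- ===== LEMMAS AND PROOFS =====

-- A's loop accepts exactly the strictly increasing lists
theorem blAdjLoop_iff_pairwise (xs : List Int) : blAdjLoop xs = true ↔ xs.Pairwise (· < ·) := by
  rw [← List.isChain_iff_pairwise]
  induction xs with
  | nil => simp [blAdjLoop]
  | cons x t ih =>
    cases t with
    | nil => simp [blAdjLoop]
    | cons y r =>
      rw [List.isChain_cons_cons, ← ih, blAdjLoop]
      constructor
      · intro h; split at h
        · exact absurd h (by simp)
        · exact ⟨by omega, h⟩
      · rintro ⟨h1, h2⟩; split
        · omega
        · exact h2

theorem ofList_sublist (xs : List Int) : (PySem.Set.ofList xs).Sublist xs := by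
  induction xs with
  | nil => simp [PySem.Set.ofList_nil]
  | cons x t ih =>
    rw [PySem.Set.ofList_cons]
    refine List.Sublist.cons₂ x (List.Sublist.trans ?_ ih)
    simp [PySem.Set.discard]

theorem ofList_length_iff_nodup (xs : List Int) :
    (PySem.Set.ofList xs).length = xs.length ↔ xs.Nodup := by
  constructor
  · intro h
    have := (ofList_sublist xs).eq_of_length h
    rw [← this]; exact PySem.Set.nodup_ofList xs
  · intro h; rw [PySem.Set.ofList_eq_self_of_nodup xs h]

-- B's sorted-and-distinct test is also exactly strict increase
theorem sorted_nodup_iff_pairwise (xs : List Int) :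
    (xs = PySem.List.sorted xs (fun x => x) false ∧ (PySem.Set.ofList xs).length = xs.length)
      ↔ xs.Pairwise (· < ·) := by
  rw [ofList_length_iff_nodup]
  constructor
  · rintro ⟨hs, hn⟩
    have hle : xs.Pairwise (· ≤ ·) := by
      rw [hs]; exact PySem.List.sorted_pairwise xs (fun x => x)
    have := hle.and hn
    exact this.imp (fun h => lt_of_le_of_ne h.1 h.2)
  · intro h
    have hle : xs.Pairwise (fun a b => (fun x => x) a ≤ (fun x => x) b) :=
      h.imp (fun h' => le_of_lt h')
    exact ⟨(PySem.List.sorted_eq_self_of_pairwise xs (fun x => x) hle).symm, h.nodup⟩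

theorem pairwise_le_getLast : ∀ (xs : List Int) (hx : xs ≠ []), xs.Pairwise (· ≤ ·) →
    ∀ y ∈ xs, y ≤ xs.getLast hx
  | [x], _, _, y, hy => by simp at hy; simp [hy]
  | x :: z :: r, hx, h, y, hy => by
    have hne : z :: r ≠ [] := by simp
    rw [List.getLast_cons hne]
    rw [List.pairwise_cons] at h
    rcases List.mem_cons.mp hy with rfl | hy'
    · exact h.1 _ (List.getLast_mem hne)
    · exact pairwise_le_getLast (z :: r) hne h.2 y hy' 

theorem min_of_pairwise (x : Int) (t : List Int) (h : (x :: t).Pairwise (· < ·)) :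
    PySem.List.min? (x :: t) (fun y => y) = some x := by
  rw [PySem.List.min?_id_cons]
  congr 1
  rcases PySem.List.foldl_min_mem t x with he | hm
  · exact he
  · have h1 := (PySem.List.foldl_min_le t x).1
    have h2 : x < t.foldl min x := (List.pairwise_cons.mp h).1 _ hm
    omega

theorem max_of_pairwise (x : Int) (t : List Int) (h : (x :: t).Pairwise (· < ·)) :
    PySem.List.max? (x :: t) (fun y => y) = some ((x :: t).getLast (by simp)) := by
  rw [PySem.List.max?_id_cons]
  congr 1
  have hle : (x :: t).Pairwise (· ≤ ·) := h.imp le_of_lt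
  have hlast := pairwise_le_getLast (x :: t) (by simp) hle
  have hmem : t.foldl max x ∈ x :: t := by
    rcases PySem.List.foldl_max_mem t x with he | hm
    · rw [he]; simp
    · simp [hm]
  have hdown := hlast _ hmem
  have hup : (x :: t).getLast (by simp) ≤ t.foldl max x := by
    rcases List.mem_cons.mp (List.getLast_mem (l := x :: t) (by simp)) with hgx | hgt
    · rw [hgx]; exact (PySem.List.le_foldl_max t x).1
    · exact (PySem.List.le_foldl_max t x).2 _ hgt
  omega

theorem pyGet_neg_one (x : Int) (t : List Int) :
    PySem.List.pyGet? (x :: t) (-1) = some ((x :: t).getLast (by simp)) := by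
  simp [PySem.List.pyGet?, PySem.List.pyIdx?]
  rw [List.getLast_eq_getElem]
  simp only [List.length_cons, Nat.add_sub_cancel]
  rfl

-- ===== VERDICT (by name: the statement is the Claim_ definition above) =====
theorem baseline_limits_are_well_formed_spec : Claim_equal_baseline_limits_are_well_formed := by
  intro bl pn _
  unfold Spec_baseline_limits_are_well_formed baseline_limits_are_well_formed baseline_limits_are_well_formed_alt
  cases bl with
  | nil => simp
  | cons x t =>
    by_cases hodd : (t.length + 1) % 2 = 1
    · simp [hodd]
    · simp only [List.length_cons]
      by_cases hp : (x :: t).Pairwise (· < ·)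
      · have hloop : blAdjLoop (x :: t) = true := (blAdjLoop_iff_pairwise _).mpr hp
        have hs := (sorted_nodup_iff_pairwise (x :: t)).mpr hp
        rw [min_of_pairwise x t hp, max_of_pairwise x t hp, pyGet_neg_one]
        have hsort : decide (x :: t = PySem.List.sorted (x :: t) fun x => x) = true :=
          decide_eq_true hs.1
        have hlen : (List.length (PySem.Set.ofList (x :: t)) == t.length + 1) = true := by
          simpa using hs.2
        simp only [hloop, hsort, hlen, Bool.true_and, Bool.and_true]
        by_cases hx0 : x < 0 <;> by_cases hl : pn ≤ (x :: t).getLast (by simp) <;>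
          simp [hx0, hl] <;> omega
      · have hloop : blAdjLoop (x :: t) = false := by
          cases hbl : blAdjLoop (x :: t)
          · rfl
          · exact absurd ((blAdjLoop_iff_pairwise _).mp hbl) hp
        have hB : (decide (x :: t = PySem.List.sorted (x :: t) fun x => x) &&
            (List.length (PySem.Set.ofList (x :: t)) == t.length + 1)) = false := by
          by_cases hsort : x :: t = PySem.List.sorted (x :: t) fun x => x
          · by_cases hlen : List.length (PySem.Set.ofList (x :: t)) = t.length + 1
            · exact absurd ((sorted_nodup_iff_pairwise (x :: t)).mp
                ⟨hsort, by simpa using hlen⟩) hp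
            · simp [hlen]
          · simp [hsort]
        simp [hloop, hB]
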